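-- pv_equiv track=rewrite | github.com/Zacon7/VINet | scripts/sampleGT_trajectory.py | getMidiumIndex
-- ===== SOURCE A (Python) =====
-- def getMidiumIndex(startTime, endTime, imu_index):
--     start_index = 0
--     end_index = 0
--     for i in range(len(imu_index)):
--         if imu_index[i] >= startTime:
--             start_index = i
--             break
--
--     for i in range(len(imu_index)):
--         if imu_index[i] >= endTime:
--             end_index = i
--             break
--
--     return int((end_index - start_index) / 2) + start_index
-- ===== SOURCE B (Python) =====
-- def getMidiumIndex(startTime, endTime, imu_index):
--     si = None
--     ei = None
--     for i, v in enumerate(imu_index):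
--         if si is None and v >= startTime:
--             si = i
--         if ei is None and v >= endTime:
--             ei = i
--         if si is not None and ei is not None:
--             break
--     if si is None:
--         si = 0
--     if ei is None:
--         ei = 0
--     return si + (ei - si) // 2
-- ===== Notes on version B (the rewrite author's own statement) =====
-- stated objective: alternative
-- what changed: A runs two separate full linear scans (one per threshold); B makes a single pass that tracks both first-match indices at once and breaks as soon as both are found, and computes the midpoint with plain integer floor division instead of A's float division plus int().
-- intended difference: On degenerate inputs where the first timestamp >= endTime comes strictly before the first timestamp >= startTime with an odd gap (e.g. endTime never matched so its index stays 0), A's int((e-s)/2) truncates the negative half-gap toward zero while B's floor-division midpoint rounds down; B's is the conventional Python integer midpoint between the two indices. — e.g. on getMidiumIndex(0, 5, [-1, 0]): A returns 1, B returns 0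
import Mathlib
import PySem

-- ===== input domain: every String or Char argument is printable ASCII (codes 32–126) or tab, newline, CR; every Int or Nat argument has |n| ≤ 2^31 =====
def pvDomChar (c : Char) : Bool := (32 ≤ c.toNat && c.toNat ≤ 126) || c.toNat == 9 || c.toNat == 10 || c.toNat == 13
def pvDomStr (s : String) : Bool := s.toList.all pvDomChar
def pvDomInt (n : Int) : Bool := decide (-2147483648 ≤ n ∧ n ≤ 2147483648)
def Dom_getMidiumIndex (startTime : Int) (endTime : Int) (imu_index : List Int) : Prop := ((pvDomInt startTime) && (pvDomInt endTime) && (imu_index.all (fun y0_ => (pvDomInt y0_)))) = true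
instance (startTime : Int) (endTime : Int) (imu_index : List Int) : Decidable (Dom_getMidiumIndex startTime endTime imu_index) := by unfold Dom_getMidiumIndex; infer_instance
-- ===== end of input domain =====

-- B replaces A's two full scans by one early-exiting pass computing both first-match indices,
-- and A's float-based int((e-s)/2) by integer floor division (same O(n); see D_ for the corner difference).
-- ===== PORT A =====
-- first index i with xs[i] >= t, else the initial 0 (A's loop with break)
def pvFirstGE (t : Int) : List Int → Int → Int
  | [], _ => 0
  | x :: r, i => if t ≤ x then i else pvFirstGE t r (i + 1)

def getMidiumIndex (startTime : Int) (endTime : Int) (imu_index : List Int) : Int :=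
  let start_index := pvFirstGE startTime imu_index 0
  let end_index := pvFirstGE endTime imu_index 0
  -- Python's int((end_index - start_index) / 2): truncation toward zero = Int.tdiv (exact here: |d| < 2^53)
  Int.tdiv (end_index - start_index) 2 + start_index

-- ===== PORT B =====
-- single pass, breaks as soon as both indices are found
def pvLoopB (s e : Int) : List Int → Int → Option Int → Option Int → Option Int × Option Int
  | [], _, si, ei => (si, ei)
  | v :: r, i, si, ei =>
    let si' := if si = none ∧ s ≤ v then some i else si
    let ei' := if ei = none ∧ e ≤ v then some i else ei
    if si'.isSome ∧ ei'.isSome then (si', ei') else pvLoopB s e r (i + 1) si' ei'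

def getMidiumIndex_alt (startTime : Int) (endTime : Int) (imu_index : List Int) : Int :=
  let p := pvLoopB startTime endTime imu_index 0 none none
  let si := p.1.getD 0
  let ei := p.2.getD 0
  si + PySem.Int.floordiv (ei - si) 2

-- ===== PRECONDITION & SPEC =====
-- first index with xs[i] ≥ t, taken as 0 when no element qualifies (a property of the input, used only by D_)
def pvThreshIdx (t : Int) (xs : List Int) : Nat :=
  if xs.any (fun x => t ≤ x) then xs.findIdx (fun x => t ≤ x) else 0

-- On degenerate inputs where the first timestamp ≥ endTime comes strictly before the first ≥ startTime with an
-- odd gap, A's int((e-s)/2) truncates the negative half-gap toward zero while B floors; B's is the conventional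
-- Python integer midpoint between the two indices.
def D_getMidiumIndex (startTime : Int) (endTime : Int) (imu_index : List Int) : Prop :=
  pvThreshIdx endTime imu_index < pvThreshIdx startTime imu_index ∧
  (pvThreshIdx startTime imu_index - pvThreshIdx endTime imu_index) % 2 = 1
instance (startTime : Int) (endTime : Int) (imu_index : List Int) : Decidable (D_getMidiumIndex startTime endTime imu_index) := by unfold D_getMidiumIndex; infer_instance

def Spec_getMidiumIndex (startTime : Int) (endTime : Int) (imu_index : List Int) (out : Int) : Prop := ¬ D_getMidiumIndex startTime endTime imu_index → out = getMidiumIndex_alt startTime endTime imu_index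
instance (startTime : Int) (endTime : Int) (imu_index : List Int) (out : Int) : Decidable (Spec_getMidiumIndex startTime endTime imu_index out) := by unfold Spec_getMidiumIndex; infer_instance

def pvDiffWitness_getMidiumIndex : Int × Int × List Int := (0, 5, [-1, 0])
def pvDiffWitnessOut_getMidiumIndex : Int × Int := (1, 0)

-- ===== CLAIM (what is proved, stated in full; the proofs are below) =====
def Claim_unchanged_getMidiumIndex : Prop := ∀ (startTime : Int) (endTime : Int) (imu_index : List Int), Dom_getMidiumIndex startTime endTime imu_index → Spec_getMidiumIndex startTime endTime imu_index (getMidiumIndex startTime endTime imu_index)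
def Claim_changed_getMidiumIndex : Prop := Dom_getMidiumIndex (pvDiffWitness_getMidiumIndex.1) (pvDiffWitness_getMidiumIndex.2.1) (pvDiffWitness_getMidiumIndex.2.2) ∧ D_getMidiumIndex (pvDiffWitness_getMidiumIndex.1) (pvDiffWitness_getMidiumIndex.2.1) (pvDiffWitness_getMidiumIndex.2.2) ∧ getMidiumIndex (pvDiffWitness_getMidiumIndex.1) (pvDiffWitness_getMidiumIndex.2.1) (pvDiffWitness_getMidiumIndex.2.2) = pvDiffWitnessOut_getMidiumIndex.1 ∧ getMidiumIndex_alt (pvDiffWitness_getMidiumIndex.1) (pvDiffWitness_getMidiumIndex.2.1) (pvDiffWitness_getMidiumIndex.2.2) = pvDiffWitnessOut_getMidiumIndex.2 ∧ pvDiffWitnessOut_getMidiumIndex.1 ≠ pvDiffWitnessOut_getMidiumIndex.2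
def Claim_exact_getMidiumIndex : Prop := ∀ (startTime : Int) (endTime : Int) (imu_index : List Int), Dom_getMidiumIndex startTime endTime imu_index → D_getMidiumIndex startTime endTime imu_index → getMidiumIndex startTime endTime imu_index ≠ getMidiumIndex_alt startTime endTime imu_index

-- ===== LEMMAS AND PROOFS =====
-- optional-valued first-match, the common characterisation of both loops
def pvFirstGE? (t : Int) : List Int → Int → Option Int
  | [], _ => none
  | x :: r, i => if t ≤ x then some i else pvFirstGE? t r (i + 1)

theorem pvFirstGE_eq_getD (t : Int) (xs : List Int) (i : Int) :
    pvFirstGE t xs i = (pvFirstGE? t xs i).getD 0 := by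
  induction xs generalizing i with
  | nil => rfl
  | cons x r ih => simp only [pvFirstGE, pvFirstGE?]; split <;> simp [ih]

theorem pvLoopB_eq (s e : Int) (xs : List Int) (i : Int) (si ei : Option Int) :
    pvLoopB s e xs i si ei =
      ((match si with | some a => some a | none => pvFirstGE? s xs i),
       (match ei with | some a => some a | none => pvFirstGE? e xs i)) := by
  induction xs generalizing i si ei with
  | nil => cases si <;> cases ei <;> rfl
  | cons v r ih =>
    simp only [pvLoopB, pvFirstGE?]
    split
    · rename_i h
      obtain ⟨h1, h2⟩ := h
      cases si <;> cases ei <;>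
        simp_all only [Option.isSome] <;> split_ifs at * <;> simp_all
    · rename_i h
      rw [ih]
      cases si <;> cases ei <;> split_ifs at * <;> simp_all

theorem pvFirstGE?_char (t : Int) (xs : List Int) (i : Int) :
    pvFirstGE? t xs i =
      if xs.any (fun x => t ≤ x) then some (i + (xs.findIdx (fun x => t ≤ x) : Int)) else none := by
  induction xs generalizing i with
  | nil => rfl
  | cons x r ih =>
    simp only [pvFirstGE?, List.any_cons, List.findIdx_cons]
    by_cases h : t ≤ x
    · simp [h]
    · simp only [h, if_false, ih, decide_false]
      by_cases h2 : r.any (fun x => t ≤ x) <;> simp [h2] <;> ring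

theorem pvFirstGE?_getD_eq (t : Int) (xs : List Int) :
    (pvFirstGE? t xs 0).getD 0 = (pvThreshIdx t xs : Int) := by
  rw [pvFirstGE?_char]
  unfold pvThreshIdx
  split <;> simp_all

theorem pvTdiv_fdiv (d : Int) (h : 0 ≤ d ∨ d % 2 = 0) :
    Int.tdiv d 2 = PySem.Int.floordiv d 2 := by
  rw [PySem.Int.floordiv_eq_ediv_of_pos (by omega)]
  rcases h with h | h
  · rw [Int.tdiv_eq_ediv_of_nonneg h]
  · obtain ⟨k, rfl⟩ : ∃ k, d = 2 * k := ⟨d / 2, by omega⟩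
    rw [Int.mul_tdiv_cancel_left _ (by omega), Int.mul_ediv_cancel_left _ (by omega)]

theorem pvTdiv_fdiv_neg_odd (d : Int) (h1 : d < 0) (h2 : d % 2 ≠ 0) :
    Int.tdiv d 2 = PySem.Int.floordiv d 2 + 1 := by
  rw [PySem.Int.floordiv_eq_ediv_of_pos (by omega)]
  obtain ⟨k, rfl⟩ : ∃ k, d = 2 * k + 1 := ⟨d / 2, by omega⟩
  have h3 := Int.tdiv_eq_ediv_of_nonneg (a := -(2 * k + 1)) (b := 2) (by omega)
  have h4 : (2 * k + 1).tdiv 2 = -((-(2 * k + 1)).tdiv 2) := by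
    rw [← Int.neg_tdiv]; simp
  omega

theorem pvIndicesA (s e : Int) (xs : List Int) :
    getMidiumIndex s e xs =
      Int.tdiv ((pvThreshIdx e xs : Int) - (pvThreshIdx s xs : Int)) 2 + (pvThreshIdx s xs : Int) := by
  unfold getMidiumIndex
  simp only [pvFirstGE_eq_getD, pvFirstGE?_getD_eq]

theorem pvIndicesB (s e : Int) (xs : List Int) :
    getMidiumIndex_alt s e xs =
      (pvThreshIdx s xs : Int) + PySem.Int.floordiv ((pvThreshIdx e xs : Int) - (pvThreshIdx s xs : Int)) 2 := by
  unfold getMidiumIndex_alt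
  rw [pvLoopB_eq]
  simp only [pvFirstGE?_getD_eq]

-- ===== VERDICT (by name: the statement is the Claim_ definition above) =====
theorem getMidiumIndex_spec : Claim_unchanged_getMidiumIndex := by
  intro s e xs _ hD
  rw [pvIndicesA, pvIndicesB, pvTdiv_fdiv]
  · ring
  · unfold D_getMidiumIndex at hD
    omega

theorem getMidiumIndex_changed : Claim_changed_getMidiumIndex := by
  unfold Claim_changed_getMidiumIndex; decide

theorem getMidiumIndex_tight : Claim_exact_getMidiumIndex := by
  intro s e xs _ hD
  rw [pvIndicesA, pvIndicesB]
  unfold D_getMidiumIndex at hD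
  rw [pvTdiv_fdiv_neg_odd _ (by omega) (by omega)]
  omega
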